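-- pv_equiv track=rewrite | github.com/ualberta-smr/QueryGitHub | main.py | prepare_search
-- ===== SOURCE A (Python) =====
-- def prepare_search(search_string):
--
--     char_list = ["\""]
--     for char in search_string:
--         if char == "\"" or char == "'":
--             char_list.append("\\")
--         char_list.append(char)
--
--     char_list.append("\"")
--
--     return "".join(char_list)
-- ===== SOURCE B (Python) =====
-- def prepare_search(search_string):
--     return '"' + search_string.replace('"', '\\"').replace("'", "\\'") + '"'
-- ===== Notes on version B (the rewrite author's own statement) =====
-- stated objective: faster
-- what changed: Replaces the manual character loop that accumulates escape fragments in a list and joins them with a closed expression of two str.replace passes (one per quote kind, over disjoint targets) wrapped in quotes.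
import Mathlib
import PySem

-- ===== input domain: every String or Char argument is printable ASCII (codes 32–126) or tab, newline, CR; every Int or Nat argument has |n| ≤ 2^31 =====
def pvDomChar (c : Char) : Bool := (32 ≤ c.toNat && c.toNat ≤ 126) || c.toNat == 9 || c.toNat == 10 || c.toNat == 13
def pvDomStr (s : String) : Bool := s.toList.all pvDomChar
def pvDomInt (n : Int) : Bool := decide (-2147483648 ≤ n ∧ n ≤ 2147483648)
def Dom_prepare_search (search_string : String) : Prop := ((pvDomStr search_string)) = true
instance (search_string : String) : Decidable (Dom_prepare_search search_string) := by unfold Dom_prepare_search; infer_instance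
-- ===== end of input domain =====

-- B replaces A's manual accumulate-and-join character loop by two str.replace passes wrapped in quotes (same O(n), measured constant-factor speedup).

-- ===== PORT A =====
-- literal port: build char_list : List String starting with ["\""], loop over the characters, append closing quote, join with "".
def prepare_search (search_string : String) : String :=
  let char_list : List String := ["\""]
  let char_list := search_string.toList.foldl
    (fun acc c =>
      (if c = '"' ∨ c = '\'' then acc ++ ["\\"] else acc) ++ [String.ofList [c]])
    char_list
  let char_list := char_list ++ ["\""]
  PySem.Str.join "" char_list

-- ===== PORT B =====
def prepare_search_alt (search_string : String) : String :=
  "\"" ++ PySem.Str.replace (PySem.Str.replace search_string "\"" "\\\"") "'" "\\'" ++ "\""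

-- ===== PRECONDITION & SPEC =====
def Spec_prepare_search (search_string : String) (out : String) : Prop := out = prepare_search_alt search_string
instance (search_string : String) (out : String) : Decidable (Spec_prepare_search search_string out) := by unfold Spec_prepare_search; infer_instance

-- ===== CLAIM (what is proved, stated in full; the proofs are below) =====
def Claim_equal_prepare_search : Prop := ∀ (search_string : String), Dom_prepare_search search_string → Spec_prepare_search search_string (prepare_search search_string)

-- ===== LEMMAS AND PROOFS =====

-- replace with a single-character pattern is a per-character flatMap
theorem replace_single (q : Char) (nw : List Char) (l : List Char) :
    PySem.Chars.replace l [q] nw = l.flatMap (fun c => if c = q then nw else [c]) := by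
  have go : ∀ (l : List Char) (fuel : Nat) (acc : List Char), l.length ≤ fuel →
      PySem.Chars.replace.go [q] nw fuel l acc
        = acc.reverse ++ l.flatMap (fun c => if c = q then nw else [c]) := by
    intro l
    induction l with
    | nil =>
      intro fuel acc _
      cases fuel <;> simp [PySem.Chars.replace.go]
    | cons c t ih =>
      intro fuel acc h
      cases fuel with
      | zero => simp at h
      | succ fuel =>
        by_cases hc : c = q
        · subst hc
          simp only [PySem.Chars.replace.go, List.isPrefixOf, beq_self_eq_true,
            Bool.and_self, if_true, List.length_cons, List.length_nil,
            List.drop_succ_cons, List.drop_zero]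
          rw [ih fuel ((nw.reverse ++ acc)) (Nat.le_of_succ_le_succ h)]
          simp
        · simp only [PySem.Chars.replace.go]
          rw [show List.isPrefixOf [q] (c :: t) = false by
            simp [List.isPrefixOf, Ne.symm hc] ]
          simp only [Bool.false_eq_true, if_false]
          rw [ih _ (c :: acc) (Nat.le_of_succ_le_succ h)]
          simp [hc]
  unfold PySem.Chars.replace
  simp only [List.isEmpty_cons, Bool.false_eq_true, if_false]
  exact go l l.length [] (le_refl _)

-- joining with the empty separator is flattening
theorem join_nil_flatten (parts : List (List Char)) :
    PySem.Chars.join [] parts = parts.flatten := by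
  induction parts with
  | nil => rfl
  | cons p ps ih =>
    cases ps with
    | nil => simp [PySem.Chars.join, List.intercalate]
    | cons q qs =>
      simp only [PySem.Chars.join, List.intercalate] at *
      simp_all [List.intersperse]

-- A's loop, character-level characterisation
theorem foldA (l : List Char) (acc : List String) :
    l.foldl (fun acc c => (if c = '"' ∨ c = '\'' then acc ++ ["\\"] else acc) ++ [String.ofList [c]]) acc
      = acc ++ l.flatMap (fun c => if c = '"' ∨ c = '\'' then [String.ofList ['\\'], String.ofList [c]] else [String.ofList [c]]) := by
  induction l generalizing acc with
  | nil => simp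
  | cons c t ih =>
    by_cases hc : c = '"' ∨ c = '\''
    · rw [List.foldl_cons, if_pos hc, ih]
      simp [hc]
    · rw [List.foldl_cons, if_neg hc, ih]
      simp [hc]

-- the two pointwise characterisations agree on the common per-character form
theorem lhs_char (l : List Char) :
    ((l.flatMap (fun c => if c = '"' ∨ c = '\'' then [String.ofList ['\\'], String.ofList [c]] else [String.ofList [c]])).map String.toList).flatten
      = l.flatMap (fun c => if c = '"' then ['\\', '"'] else if c = '\'' then ['\\', '\''] else [c]) := by
  induction l with
  | nil => rfl
  | cons c t ih =>
    by_cases h1 : c = '"'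
    · simp [h1, ih]
    · by_cases h2 : c = '\''
      · simp [h2, ih]
      · simp [h1, h2, ih]

theorem rhs_char (l : List Char) :
    (l.flatMap (fun c => if c = '"' then ['\\', '"'] else [c])).flatMap (fun c => if c = '\'' then ['\\', '\''] else [c])
      = l.flatMap (fun c => if c = '"' then ['\\', '"'] else if c = '\'' then ['\\', '\''] else [c]) := by
  induction l with
  | nil => rfl
  | cons c t ih =>
    by_cases h1 : c = '"'
    · simp [h1, ih]
    · by_cases h2 : c = '\''
      · simp [h2, ih]
      · simp [h1, h2, ih]

-- ===== VERDICT (by name: the statement is the Claim_ definition above) =====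
theorem prepare_search_spec : Claim_equal_prepare_search := by
  intro s _
  unfold Spec_prepare_search prepare_search prepare_search_alt
  rw [← String.toList_inj]
  simp only [foldA, PySem.Str.toList_join, String.toList_append, PySem.Str.toList_replace]
  simp only [show ("" : String).toList = [] from rfl,
    show ("\"" : String).toList = ['"'] from rfl,
    show ("'" : String).toList = ['\''] from rfl,
    show ("\\\"" : String).toList = ['\\', '"'] from rfl,
    show ("\\'" : String).toList = ['\\', '\''] from rfl]
  rw [replace_single, replace_single, join_nil_flatten]
  simp only [List.map_append, List.map_cons, List.map_nil, List.flatten_append,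
    List.flatten_cons, List.flatten_nil]
  rw [lhs_char, rhs_char]
  simp
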